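-- pv_equiv track=rewrite | github.com/Lowji1910/Caro-minimax-website- | ai.py | can_win_next
-- ===== SOURCE A (Python) =====
-- def check_win(board, symbol):
--     n = len(board)
--     directions = [(0,1), (1,0), (1,1), (1,-1)]
--     for r in range(n):
--         for c in range(n):
--             if board[r][c] != symbol:
--                 continue
--             for dr, dc in directions:
--                 pr, pc = r - dr, c - dc
--                 if 0 <= pr < n and 0 <= pc < n and board[pr][pc] == symbol:
--                     continue
--                 count = 0
--                 rr, cc = r, c
--                 while 0 <= rr < n and 0 <= cc < n and board[rr][cc] == symbol:
--                     count += 1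
--                     rr += dr
--                     cc += dc
--                 if count >= 5:
--                     left_block = False
--                     right_block = False
--                     lr, lc = r - dr, c - dc
--                     if not (0 <= lr < n and 0 <= lc < n) or board[lr][lc] != '':
--                         left_block = True
--                     rr_end, cc_end = r + dr*count, c + dc*count
--                     if not (0 <= rr_end < n and 0 <= cc_end < n) or board[rr_end][cc_end] != '':
--                         right_block = True
--                     if not (left_block and right_block):
--                         return True
--     return False
--
-- def can_win_next(board, symbol):
--     n = len(board)
--     for r in range(n):
--         for c in range(n):
--             if board[r][c] == '':
--                 board[r][c] = symbol
--                 if check_win(board, symbol):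
--                     board[r][c] = ''
--                     return True
--                 board[r][c] = ''
--     return False
-- ===== SOURCE B (Python) =====
-- def _run_length(board, symbol, n, dr, dc, rr, cc):
--     k = 0
--     while 0 <= rr < n and 0 <= cc < n and board[rr][cc] == symbol:
--         k += 1
--         rr += dr
--         cc += dc
--     return k
--
-- def can_win_next(board, symbol):
--     n = len(board)
--     dirs = ((0, 1), (1, 0), (1, 1), (1, -1))
--     # phase 1: one scan of the board collecting the end-cell pairs of every run
--     # that is already a win for `symbol` (length >= 5, at least one open end)
--     wins = []
--     for r in range(n):
--         for c in range(n):
--             if board[r][c] != symbol: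
--                 continue
--             for dr, dc in dirs:
--                 pr, pc = r - dr, c - dc
--                 if 0 <= pr < n and 0 <= pc < n and board[pr][pc] == symbol:
--                     continue  # not the start of a maximal run
--                 k = _run_length(board, symbol, n, dr, dc, r, c)
--                 if k >= 5:
--                     er, ec = r + dr * k, c + dc * k
--                     open_l = 0 <= pr < n and 0 <= pc < n and board[pr][pc] == ''
--                     open_r = 0 <= er < n and 0 <= ec < n and board[er][ec] == ''
--                     if open_l or open_r:
--                         wins.append(((pr, pc), (er, ec)))
--     # phase 2: per empty cell, a pre-existing win untouched by the move, or a
--     # new win on one of the 4 lines through the placed cell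
--     for r in range(n):
--         for c in range(n):
--             if board[r][c] != '':
--                 continue
--             if any(e1 != (r, c) and e2 != (r, c) for e1, e2 in wins):
--                 return True
--             for dr, dc in dirs:
--                 b = _run_length(board, symbol, n, -dr, -dc, r - dr, c - dc)
--                 f = _run_length(board, symbol, n, dr, dc, r + dr, c + dc)
--                 if b + 1 + f >= 5:
--                     lr, lc = r - dr * (b + 1), c - dc * (b + 1)
--                     er, ec = r + dr * (f + 1), c + dc * (f + 1)
--                     open_l = 0 <= lr < n and 0 <= lc < n and board[lr][lc] == ''
--                     open_r = 0 <= er < n and 0 <= ec < n and board[er][ec] == ''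
--                     if open_l or open_r:
--                         return True
--     return False
-- ===== Notes on version B (the rewrite author's own statement) =====
-- stated objective: alternative
-- what changed: Instead of placing the symbol in every empty cell and re-running the full-board scan check_win each time, B scans the board once to collect the end-cells of already-winning runs and then, per empty cell, examines only the 4 lines through that cell (backward/forward run lengths plus open-end tests), consulting the precomputed run list for wins the move does not touch.
import Mathlib
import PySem

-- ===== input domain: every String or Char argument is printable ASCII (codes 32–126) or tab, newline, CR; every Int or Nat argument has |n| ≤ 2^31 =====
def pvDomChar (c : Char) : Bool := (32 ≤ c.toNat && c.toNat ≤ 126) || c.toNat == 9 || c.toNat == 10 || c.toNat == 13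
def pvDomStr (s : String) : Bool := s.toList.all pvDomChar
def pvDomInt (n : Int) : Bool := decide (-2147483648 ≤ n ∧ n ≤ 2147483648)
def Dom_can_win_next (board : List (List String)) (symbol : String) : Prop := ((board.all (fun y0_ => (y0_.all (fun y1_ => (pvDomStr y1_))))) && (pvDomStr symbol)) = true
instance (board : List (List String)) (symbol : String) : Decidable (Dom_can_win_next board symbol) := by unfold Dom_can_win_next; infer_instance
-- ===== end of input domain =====

-- B replaces A's "place in every empty cell, then rescan the whole board" with one scan
-- collecting the already-winning runs plus, per empty cell, a check of only the 4 lines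
-- through that cell; A mutates `board` but restores it before returning (net no mutation),
-- and the equivalence proved here is about the return value.

-- ===== PORT A =====
-- shared low-level helpers (the literal Python conditions/expressions)
def pvInb (n x y : Int) : Bool := decide (0 ≤ x) && decide (x < n) && decide (0 ≤ y) && decide (y < n)

def pvCell (board : List (List String)) (x y : Int) : String :=
  (board.getD x.toNat []).getD y.toNat ""

-- `0 <= x < n and 0 <= y < n and board[x][y] == symbol`
def pvS (board : List (List String)) (symbol : String) (n : Int) (q : Int × Int) : Bool :=
  pvInb n q.1 q.2 && (pvCell board q.1 q.2 == symbol)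

-- `0 <= x < n and 0 <= y < n and board[x][y] == ''`
def pvOpen (board : List (List String)) (n : Int) (q : Int × Int) : Bool :=
  pvInb n q.1 q.2 && (pvCell board q.1 q.2 == "")

def pvDirs : List (Int × Int) := [(0,1), (1,0), (1,1), (1,-1)]

-- the `while` loop of A (and of B's helper _run_length): count symbol cells along a ray;
-- the fuel (length+1 at every call site) is an upper bound on the iterations, for totality only
def pvRun (S : Int × Int → Bool) (d : Int × Int) (q : Int × Int) : Nat → Nat
  | 0 => 0
  | fuel+1 => if S q then pvRun S d (q.1 + d.1, q.2 + d.2) fuel + 1 else 0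

def check_win (board : List (List String)) (symbol : String) : Bool :=
  let n : Int := board.length
  (PySem.List.pyRange 0 n 1).any fun r =>
    (PySem.List.pyRange 0 n 1).any fun c =>
      if pvCell board r c == symbol then
        pvDirs.any fun d =>
          if pvS board symbol n (r - d.1, c - d.2) then false
          else
            let count := pvRun (pvS board symbol n) d (r, c) (board.length + 1)
            if 5 ≤ count then
              let leftBlock := !(pvOpen board n (r - d.1, c - d.2))
              let rightBlock := !(pvOpen board n (r + d.1 * (count : Int), c + d.2 * (count : Int)))
              !(leftBlock && rightBlock)
            else false
      else false

-- board[r][c] = v  (r, c in range at every call site)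
def pvSet (board : List (List String)) (r c : Int) (v : String) : List (List String) :=
  board.set r.toNat ((board.getD r.toNat []).set c.toNat v)

def can_win_next (board : List (List String)) (symbol : String) : Bool :=
  let n : Int := board.length
  (PySem.List.pyRange 0 n 1).any fun r =>
    (PySem.List.pyRange 0 n 1).any fun c =>
      if pvCell board r c == "" then
        check_win (pvSet board r c symbol) symbol
      else false

-- ===== PORT B =====
-- phase 1 of B: end-cell pairs of every already-winning run
def pvWins (board : List (List String)) (symbol : String) : List ((Int × Int) × (Int × Int)) :=
  let n : Int := board.length
  (PySem.List.pyRange 0 n 1).flatMap fun r =>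
    (PySem.List.pyRange 0 n 1).flatMap fun c =>
      if pvCell board r c == symbol then
        pvDirs.filterMap fun d =>
          if pvS board symbol n (r - d.1, c - d.2) then none
          else
            let k := pvRun (pvS board symbol n) d (r, c) (board.length + 1)
            if 5 ≤ k then
              if pvOpen board n (r - d.1, c - d.2) ||
                 pvOpen board n (r + d.1 * (k : Int), c + d.2 * (k : Int)) then
                some ((r - d.1, c - d.2), (r + d.1 * (k : Int), c + d.2 * (k : Int)))
              else none
            else none
      else []

def can_win_next_alt (board : List (List String)) (symbol : String) : Bool :=
  let n : Int := board.length
  let wins := pvWins board symbol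
  (PySem.List.pyRange 0 n 1).any fun r =>
    (PySem.List.pyRange 0 n 1).any fun c =>
      if pvCell board r c == "" then
        (wins.any fun w => decide (w.1 ≠ (r, c)) && decide (w.2 ≠ (r, c))) ||
        pvDirs.any fun d =>
          let b := pvRun (pvS board symbol n) (-d.1, -d.2) (r - d.1, c - d.2) (board.length + 1)
          let f := pvRun (pvS board symbol n) d (r + d.1, c + d.2) (board.length + 1)
          if 5 ≤ b + 1 + f then
            pvOpen board n (r - d.1 * ((b : Int) + 1), c - d.2 * ((b : Int) + 1)) ||
            pvOpen board n (r + d.1 * ((f : Int) + 1), c + d.2 * ((f : Int) + 1))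
          else false
      else false

-- ===== PRECONDITION & SPEC =====
-- Pre_ excludes ragged boards (some row shorter than the number of rows): on them A raises
-- IndexError except when an early-found win returns before the short row is read, and B's
-- single precompute scan itself raises IndexError there.
def Pre_can_win_next (board : List (List String)) (symbol : String) : Prop :=
  ∀ row ∈ board, board.length ≤ row.length
instance (board : List (List String)) (symbol : String) : Decidable (Pre_can_win_next board symbol) := by
  unfold Pre_can_win_next; infer_instance

def pvWitness_can_win_next : List (List String) × String := ([["", "x"], ["x", ""]], "x")

def Spec_can_win_next (board : List (List String)) (symbol : String) (out : Bool) : Prop := out = can_win_next_alt board symbol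
instance (board : List (List String)) (symbol : String) (out : Bool) : Decidable (Spec_can_win_next board symbol out) := by unfold Spec_can_win_next; infer_instance

-- ===== CLAIM (what is proved, stated in full; the proofs are below) =====
def Claim_equal_can_win_next : Prop := ∀ (board : List (List String)) (symbol : String), Dom_can_win_next board symbol → Pre_can_win_next board symbol → Spec_can_win_next board symbol (can_win_next board symbol)

-- ===== LEMMAS AND PROOFS =====

-- position q + j·d on the ray from q in direction d
def pvAtZ (q d : Int × Int) (j : Int) : Int × Int := (q.1 + d.1 * j, q.2 + d.2 * j)

-- a direction whose ray eventually leaves any n×n board (all 8 used directions qualify)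
def pvDirOk (d : Int × Int) : Prop :=
  d.1 = 1 ∨ d.1 = -1 ∨ (d.1 = 0 ∧ (d.2 = 1 ∨ d.2 = -1))

-- run length from q in direction d (what pvRun computes with sufficient fuel)
def pvK (board : List (List String)) (symbol : String) (d q : Int × Int) : Nat :=
  pvRun (pvS board symbol (board.length : Int)) d q (board.length + 1)

-- "the run starting at q in direction d is a win on this board"
def WinP (board : List (List String)) (symbol : String) (q d : Int × Int) : Prop :=
  pvS board symbol (board.length : Int) q = true ∧
  pvS board symbol (board.length : Int) (pvAtZ q d (-1)) = false ∧
  5 ≤ pvK board symbol d q ∧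
  (pvOpen board (board.length : Int) (pvAtZ q d (-1)) = true ∨
   pvOpen board (board.length : Int) (pvAtZ q d (pvK board symbol d q)) = true)

-- backward / forward run lengths next to p along d (phase-2 quantities of B)
def pvB (board : List (List String)) (symbol : String) (p d : Int × Int) : Nat :=
  pvRun (pvS board symbol (board.length : Int)) (-d.1, -d.2) (p.1 - d.1, p.2 - d.2) (board.length + 1)

def pvF (board : List (List String)) (symbol : String) (p d : Int × Int) : Nat :=
  pvRun (pvS board symbol (board.length : Int)) d (p.1 + d.1, p.2 + d.2) (board.length + 1)

-- "placing symbol at p makes a win on one of the 4 lines through p"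
def LocalP (board : List (List String)) (symbol : String) (p d : Int × Int) : Prop :=
  5 ≤ pvB board symbol p d + 1 + pvF board symbol p d ∧
  (pvOpen board (board.length : Int)
      (p.1 - d.1 * ((pvB board symbol p d : Int) + 1), p.2 - d.2 * ((pvB board symbol p d : Int) + 1)) = true ∨
   pvOpen board (board.length : Int)
      (p.1 + d.1 * ((pvF board symbol p d : Int) + 1), p.2 + d.2 * ((pvF board symbol p d : Int) + 1)) = true)

theorem pvAtZ_zero (q d : Int × Int) : pvAtZ q d 0 = q := by simp [pvAtZ]

theorem pvAtZ_add (q d : Int × Int) (i j : Int) :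
    pvAtZ (pvAtZ q d i) d j = pvAtZ q d (i + j) := by
  simp [pvAtZ]; constructor <;> ring

theorem pvAtZ_shift (q d : Int × Int) (j : Nat) :
    pvAtZ (q.1 + d.1, q.2 + d.2) d (j : Int) = pvAtZ q d ((j + 1 : Nat) : Int) := by
  simp only [pvAtZ, Prod.ext_iff]
  push_cast
  constructor <;> ring

theorem pvAtZ_inj (d : Int × Int) (hd : pvDirOk d) (q : Int × Int) {i j : Int}
    (h : pvAtZ q d i = pvAtZ q d j) : i = j := by
  obtain ⟨d1, d2⟩ := d
  have h1 := congrArg Prod.fst h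
  have h2 := congrArg Prod.snd h
  simp [pvAtZ] at h1 h2
  rcases hd with hd | hd | ⟨hd1, hd2 | hd2⟩ <;> simp_all

theorem pvS_of_inb_false (board : List (List String)) (symbol : String) (n : Int)
    (q : Int × Int) (h : ¬(0 ≤ q.1 ∧ q.1 < n ∧ 0 ≤ q.2 ∧ q.2 < n)) :
    pvS board symbol n q = false := by
  have : pvInb n q.1 q.2 = false := by simp [pvInb]; omega
  simp [pvS, this]

theorem run_spec (S : Int × Int → Bool) (d q : Int × Int) (fuel : Nat)
    (h : ∃ i : Nat, i < fuel ∧ S (pvAtZ q d (i : Int)) = false) :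
    (∀ j : Nat, j < pvRun S d q fuel → S (pvAtZ q d (j : Int)) = true) ∧
    S (pvAtZ q d (pvRun S d q fuel : Int)) = false ∧ pvRun S d q fuel < fuel := by
  induction fuel generalizing q with
  | zero => obtain ⟨i, hi, _⟩ := h; omega
  | succ f ih =>
    by_cases hS : S q = true
    · obtain ⟨i, hi, hSi⟩ := h
      have hi0 : i ≠ 0 := by
        rintro rfl
        rw [show ((0 : Nat) : Int) = 0 from rfl, pvAtZ_zero] at hSi
        rw [hS] at hSi; exact Bool.true_eq_false.mp hSi
      obtain ⟨i', rfl⟩ : ∃ i', i = i' + 1 := ⟨i - 1, by omega⟩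
      have hrec := ih (q.1 + d.1, q.2 + d.2)
        ⟨i', by omega, by rw [pvAtZ_shift]; exact hSi⟩
      obtain ⟨H1, H2, H3⟩ := hrec
      have hrun : pvRun S d q (f + 1) = pvRun S d (q.1 + d.1, q.2 + d.2) f + 1 := by
        simp [pvRun, hS]
      refine ⟨?_, ?_, by omega⟩
      · intro j hj
        cases j with
        | zero => rw [show ((0 : Nat) : Int) = 0 from rfl, pvAtZ_zero]; exact hS
        | succ j' => rw [← pvAtZ_shift]; exact H1 j' (by omega)
      · rw [hrun, ← pvAtZ_shift]; exact H2
    · have hS' : S q = false := by simpa using hS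
      have hrun : pvRun S d q (f + 1) = 0 := by simp [pvRun, hS']
      refine ⟨by omega, ?_, by omega⟩
      rw [hrun, show ((0 : Nat) : Int) = 0 from rfl, pvAtZ_zero]; exact hS'

theorem run_eq (S : Int × Int → Bool) (d q : Int × Int) (k fuel : Nat) (hk : k < fuel)
    (h1 : ∀ j : Nat, j < k → S (pvAtZ q d (j : Int)) = true)
    (h2 : S (pvAtZ q d (k : Int)) = false) :
    pvRun S d q fuel = k := by
  induction k generalizing q fuel with
  | zero =>
    obtain ⟨f, rfl⟩ : ∃ f, fuel = f + 1 := ⟨fuel - 1, by omega⟩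
    rw [show ((0 : Nat) : Int) = 0 from rfl, pvAtZ_zero] at h2
    simp [pvRun, h2]
  | succ k' ih =>
    obtain ⟨f, rfl⟩ : ∃ f, fuel = f + 1 := ⟨fuel - 1, by omega⟩
    have hS : S q = true := by
      have := h1 0 (by omega)
      rwa [show ((0 : Nat) : Int) = 0 from rfl, pvAtZ_zero] at this
    have : pvRun S d q (f + 1) = pvRun S d (q.1 + d.1, q.2 + d.2) f + 1 := by
      simp [pvRun, hS]
    rw [this, ih (q.1 + d.1, q.2 + d.2) f (by omega)
      (fun j hj => by rw [pvAtZ_shift]; exact h1 (j + 1) (by omega))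
      (by rw [pvAtZ_shift]; exact h2)]

theorem stop_exists (board : List (List String)) (symbol : String) (d q : Int × Int)
    (hd : pvDirOk d) :
    ∃ i : Nat, i ≤ board.length ∧
      pvS board symbol (board.length : Int) (pvAtZ q d (i : Int)) = false := by
  obtain ⟨d1, d2⟩ := d
  simp only [pvDirOk] at hd
  rcases hd with hd | hd | ⟨hd1, hd2 | hd2⟩
  · by_cases h : q.1 < 0
    · exact ⟨0, Nat.zero_le _, pvS_of_inb_false _ _ _ _ (by simp [pvAtZ]; omega)⟩
    · exact ⟨board.length, le_refl _,
        pvS_of_inb_false _ _ _ _ (by subst hd; simp [pvAtZ]; omega)⟩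
  · by_cases h : (board.length : Int) ≤ q.1
    · exact ⟨0, Nat.zero_le _, pvS_of_inb_false _ _ _ _ (by simp [pvAtZ]; omega)⟩
    · exact ⟨board.length, le_refl _,
        pvS_of_inb_false _ _ _ _ (by subst hd; simp [pvAtZ]; omega)⟩
  · by_cases h : q.2 < 0
    · exact ⟨0, Nat.zero_le _, pvS_of_inb_false _ _ _ _ (by simp [pvAtZ]; omega)⟩
    · exact ⟨board.length, le_refl _,
        pvS_of_inb_false _ _ _ _ (by subst hd1; subst hd2; simp [pvAtZ]; omega)⟩
  · by_cases h : (board.length : Int) ≤ q.2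
    · exact ⟨0, Nat.zero_le _, pvS_of_inb_false _ _ _ _ (by simp [pvAtZ]; omega)⟩
    · exact ⟨board.length, le_refl _,
        pvS_of_inb_false _ _ _ _ (by subst hd1; subst hd2; simp [pvAtZ]; omega)⟩

theorem pvAtZ_neg_one (q d : Int × Int) : pvAtZ q d (-1) = (q.1 - d.1, q.2 - d.2) := by
  simp [pvAtZ]; constructor <;> ring

theorem ite_bool_then (c : Prop) [Decidable c] (x : Bool) :
    ((if c then x else false) = true) ↔ (c ∧ x = true) := by
  split <;> simp_all

theorem ite_bool_else (c : Prop) [Decidable c] (x : Bool) :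
    ((if c then false else x) = true) ↔ (¬c ∧ x = true) := by
  split <;> simp_all

theorem mem_dirs_ok (d : Int × Int) (h : d ∈ pvDirs) :
    pvDirOk d ∧ pvDirOk (-d.1, -d.2) := by
  fin_cases h <;> exact ⟨by simp [pvDirOk], by simp [pvDirOk]⟩

theorem K_spec (board : List (List String)) (symbol : String) (d q : Int × Int)
    (hd : pvDirOk d) :
    (∀ j : Nat, j < pvK board symbol d q →
      pvS board symbol (board.length : Int) (pvAtZ q d (j : Int)) = true) ∧
    pvS board symbol (board.length : Int) (pvAtZ q d (pvK board symbol d q : Int)) = false ∧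
    pvK board symbol d q ≤ board.length := by
  obtain ⟨i, hi, hSi⟩ := stop_exists board symbol d q hd
  have := run_spec (pvS board symbol (board.length : Int)) d q (board.length + 1)
    ⟨i, by omega, hSi⟩
  exact ⟨this.1, this.2.1, by have := this.2.2; unfold pvK; omega⟩

theorem K_eq (board : List (List String)) (symbol : String) (d q : Int × Int) (k : Nat)
    (hk : k ≤ board.length)
    (h1 : ∀ j : Nat, j < k → pvS board symbol (board.length : Int) (pvAtZ q d (j : Int)) = true)
    (h2 : pvS board symbol (board.length : Int) (pvAtZ q d (k : Int)) = false) :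
    pvK board symbol d q = k :=
  run_eq _ d q k (board.length + 1) (by omega) h1 h2

theorem pvSet_length (board : List (List String)) (r c : Int) (v : String) :
    (pvSet board r c v).length = board.length := by
  simp [pvSet]

theorem getD_set' {α : Type} (l : List α) (i j : Nat) (a d : α) :
    (l.set i a).getD j d = if i = j ∧ i < l.length then a else l.getD j d := by
  rw [List.getD_eq_getElem?_getD, List.getElem?_set, List.getD_eq_getElem?_getD]
  split_ifs with h1 h2 h3 h3 <;> first | rfl | omega | simp_all

theorem pvCell_set (board : List (List String)) (p1 p2 : Int) (v : String) (x y : Int)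
    (hpre : ∀ row ∈ board, board.length ≤ row.length)
    (hp : 0 ≤ p1 ∧ p1 < (board.length : Int) ∧ 0 ≤ p2 ∧ p2 < (board.length : Int))
    (hx : 0 ≤ x ∧ x < (board.length : Int) ∧ 0 ≤ y ∧ y < (board.length : Int)) :
    pvCell (pvSet board p1 p2 v) x y = if x = p1 ∧ y = p2 then v else pvCell board x y := by
  have hp1 : p1.toNat < board.length := by omega
  have hrow : board.getD p1.toNat [] ∈ board := by
    rw [List.getD_eq_getElem board [] hp1]; exact List.getElem_mem hp1
  have hrowlen : board.length ≤ (board.getD p1.toNat []).length := hpre _ hrow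
  unfold pvCell pvSet
  rw [getD_set']
  by_cases hxp : x = p1
  · subst hxp
    rw [if_pos ⟨by omega, by omega⟩, getD_set']
    by_cases hyp : y = p2
    · subst hyp
      rw [if_pos ⟨by omega, by omega⟩, if_pos ⟨rfl, rfl⟩]
    · rw [if_neg (by omega), if_neg (fun h => hyp h.2)]
  · rw [if_neg (by omega), if_neg (fun h => hxp h.1)]

theorem pvS_set (board : List (List String)) (symbol : String) (p1 p2 : Int)
    (hpre : ∀ row ∈ board, board.length ≤ row.length)
    (hp : 0 ≤ p1 ∧ p1 < (board.length : Int) ∧ 0 ≤ p2 ∧ p2 < (board.length : Int))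
    (q : Int × Int) :
    pvS (pvSet board p1 p2 symbol) symbol (board.length : Int) q =
      if q = (p1, p2) then true else pvS board symbol (board.length : Int) q := by
  by_cases hq : q = (p1, p2)
  · subst hq
    have hcell := pvCell_set board p1 p2 symbol p1 p2 hpre hp hp
    rw [if_pos ⟨rfl, rfl⟩] at hcell
    rw [if_pos rfl]
    simp only [pvS, pvInb]
    rw [hcell]
    simp; omega
  · rw [if_neg hq]
    by_cases hinb : 0 ≤ q.1 ∧ q.1 < (board.length : Int) ∧ 0 ≤ q.2 ∧ q.2 < (board.length : Int)
    · have hcell := pvCell_set board p1 p2 symbol q.1 q.2 hpre hp hinb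
      have hne : ¬(q.1 = p1 ∧ q.2 = p2) := by
        intro h; exact hq (by cases q; simp_all)
      rw [if_neg hne] at hcell
      simp only [pvS]; rw [hcell]
    · rw [pvS_of_inb_false _ _ _ _ hinb, pvS_of_inb_false _ _ _ _ hinb]

theorem pvOpen_set (board : List (List String)) (p1 p2 : Int) (v : String)
    (hpre : ∀ row ∈ board, board.length ≤ row.length)
    (hp : 0 ≤ p1 ∧ p1 < (board.length : Int) ∧ 0 ≤ p2 ∧ p2 < (board.length : Int))
    (q : Int × Int) (hq : q ≠ (p1, p2)) :
    pvOpen (pvSet board p1 p2 v) (board.length : Int) q =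
      pvOpen board (board.length : Int) q := by
  by_cases hinb : 0 ≤ q.1 ∧ q.1 < (board.length : Int) ∧ 0 ≤ q.2 ∧ q.2 < (board.length : Int)
  · have hcell := pvCell_set board p1 p2 v q.1 q.2 hpre hp hinb
    have hne : ¬(q.1 = p1 ∧ q.2 = p2) := by
      intro h; exact hq (by cases q; simp_all)
    rw [if_neg hne] at hcell
    simp only [pvOpen]; rw [hcell]
  · have : pvInb (board.length : Int) q.1 q.2 = false := by simp [pvInb]; omega
    simp [pvOpen, this]

theorem check_win_iff (board : List (List String)) (symbol : String) :
    check_win board symbol = true ↔ ∃ q d, d ∈ pvDirs ∧ WinP board symbol q d := by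
  unfold check_win
  simp only [List.any_eq_true, PySem.List.mem_pyRange_one, ite_bool_then, ite_bool_else]
  constructor
  · rintro ⟨r, hr, c, hc, hcell, d, hd, hprev, hcnt, hopen⟩
    refine ⟨(r, c), d, hd, ?_, ?_, hcnt, ?_⟩
    · simp only [pvS, pvInb]
      simp [hcell]
      omega
    · rw [pvAtZ_neg_one]
      simpa using hprev
    · rw [pvAtZ_neg_one]
      simp only [pvK, pvAtZ]
      simpa using hopen
  · rintro ⟨⟨r, c⟩, d, hd, hS, hprev, hcnt, hopen⟩
    have hinb : pvInb (board.length : Int) r c = true ∧ (pvCell board r c == symbol) = true := by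
      simpa [pvS] using hS
    have hb : (0 ≤ r ∧ r < (board.length : Int)) ∧ 0 ≤ c ∧ c < (board.length : Int) := by
      have := hinb.1
      simp [pvInb] at this
      tauto
    refine ⟨r, hb.1, c, hb.2, hinb.2, d, hd, ?_, hcnt, ?_⟩
    · rw [pvAtZ_neg_one] at hprev; simp [hprev]
    · rw [pvAtZ_neg_one] at hopen
      simp only [pvK, pvAtZ] at hopen
      simpa using hopen

theorem mem_ite_nil {α : Type} (c : Prop) [Decidable c] (l : List α) (x : α) :
    (x ∈ (if c then l else ([] : List α))) ↔ c ∧ x ∈ l := by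
  split <;> simp_all

theorem ite_none_eq_some {α : Type} (c : Prop) [Decidable c] (x : Option α) (a : α) :
    ((if c then none else x) = some a) ↔ (¬c ∧ x = some a) := by
  split <;> simp_all

theorem ite_some_eq_some {α : Type} (c : Prop) [Decidable c] (x : Option α) (a : α) :
    ((if c then x else none) = some a) ↔ (c ∧ x = some a) := by
  split <;> simp_all

theorem wins_iff (board : List (List String)) (symbol : String) (w : (Int × Int) × (Int × Int)) :
    w ∈ pvWins board symbol ↔ ∃ q d, d ∈ pvDirs ∧ WinP board symbol q d ∧
      w = (pvAtZ q d (-1), pvAtZ q d (pvK board symbol d q : Int)) := by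
  unfold pvWins
  simp only [List.mem_flatMap, PySem.List.mem_pyRange_one, mem_ite_nil, List.mem_filterMap,
    ite_none_eq_some, ite_some_eq_some, Option.some_inj]
  constructor
  · rintro ⟨r, hr, c, hc, hcell, d, hd, hprev, hcnt, hopen, hw⟩
    refine ⟨(r, c), d, hd, ⟨?_, ?_, hcnt, ?_⟩, ?_⟩
    · simp only [pvS, pvInb]
      simp [hcell]
      omega
    · rw [pvAtZ_neg_one]
      simpa using hprev
    · rw [pvAtZ_neg_one]
      simp only [pvK, pvAtZ]
      simpa using hopen
    · rw [pvAtZ_neg_one]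
      simp only [pvK, pvAtZ]
      exact hw.symm
  · rintro ⟨⟨r, c⟩, d, hd, ⟨hS, hprev, hcnt, hopen⟩, hw⟩
    have hinb : pvInb (board.length : Int) r c = true ∧ (pvCell board r c == symbol) = true := by
      simpa [pvS] using hS
    have hb : (0 ≤ r ∧ r < (board.length : Int)) ∧ 0 ≤ c ∧ c < (board.length : Int) := by
      have := hinb.1
      simp [pvInb] at this
      tauto
    refine ⟨r, hb.1, c, hb.2, hinb.2, d, hd, ?_, hcnt, ?_, ?_⟩
    · rw [pvAtZ_neg_one] at hprev; simp [hprev]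
    · rw [pvAtZ_neg_one] at hopen
      simp only [pvK, pvAtZ] at hopen
      simpa using hopen
    · rw [pvAtZ_neg_one] at hw
      simp only [pvK, pvAtZ] at hw
      exact hw.symm

theorem alt_iff (board : List (List String)) (symbol : String) :
    can_win_next_alt board symbol = true ↔
      ∃ p : Int × Int, (0 ≤ p.1 ∧ p.1 < (board.length : Int)) ∧
        (0 ≤ p.2 ∧ p.2 < (board.length : Int)) ∧ (pvCell board p.1 p.2 == "") = true ∧
        ((∃ q d, d ∈ pvDirs ∧ WinP board symbol q d ∧
            pvAtZ q d (-1) ≠ p ∧ pvAtZ q d (pvK board symbol d q : Int) ≠ p) ∨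
         (∃ d ∈ pvDirs, LocalP board symbol p d)) := by
  unfold can_win_next_alt
  simp only [List.any_eq_true, PySem.List.mem_pyRange_one, ite_bool_then, Bool.or_eq_true,
    Bool.and_eq_true, decide_eq_true_eq]
  constructor
  · rintro ⟨r, hr, c, hc, hcell, h⟩
    refine ⟨(r, c), hr, hc, hcell, ?_⟩
    rcases h with ⟨w, hw, hw1, hw2⟩ | ⟨d, hd, hcnt, hopen⟩
    · rw [wins_iff] at hw
      obtain ⟨q, d, hd, hwin, rfl⟩ := hw
      exact Or.inl ⟨q, d, hd, hwin, hw1, hw2⟩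
    · exact Or.inr ⟨d, hd, hcnt, hopen⟩
  · rintro ⟨⟨r, c⟩, hr, hc, hcell, h⟩
    refine ⟨r, hr, c, hc, hcell, ?_⟩
    rcases h with ⟨q, d, hd, hwin, hw1, hw2⟩ | ⟨d, hd, hloc⟩
    · exact Or.inl ⟨(pvAtZ q d (-1), pvAtZ q d (pvK board symbol d q : Int)),
        (wins_iff board symbol _).2 ⟨q, d, hd, hwin, rfl⟩, hw1, hw2⟩
    · exact Or.inr ⟨d, hd, hloc.1, hloc.2⟩

theorem back_pos (p d : Int × Int) (i : Int) :
    pvAtZ (p.1 - d.1, p.2 - d.2) (-d.1, -d.2) i = pvAtZ p d (-1 - i) := by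
  simp [pvAtZ]; constructor <;> ring

theorem fwd_pos (p d : Int × Int) (i : Int) :
    pvAtZ (p.1 + d.1, p.2 + d.2) d i = pvAtZ p d (1 + i) := by
  simp [pvAtZ]; constructor <;> ring

theorem pvS_inb (board : List (List String)) (symbol : String) (n : Int) (q : Int × Int)
    (h : pvS board symbol n q = true) : 0 ≤ q.1 ∧ q.1 < n ∧ 0 ≤ q.2 ∧ q.2 < n := by
  by_contra hc
  rw [pvS_of_inb_false _ _ _ _ hc] at h
  simp at h

theorem chain_le (board : List (List String)) (symbol : String) (d : Int × Int)
    (hdok : pvDirOk d) (s : Int × Int) (k : Nat)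
    (h : ∀ j : Nat, j < k → pvS board symbol (board.length : Int) (pvAtZ s d (j : Int)) = true) :
    k ≤ board.length := by
  by_contra hk
  simp only [not_le] at hk
  have h0 := pvS_inb _ _ _ _ (h 0 (by omega))
  have hL := pvS_inb _ _ _ _ (h board.length (by omega))
  rw [show ((0 : Nat) : Int) = 0 from rfl, pvAtZ_zero] at h0
  obtain ⟨d1, d2⟩ := d
  simp only [pvDirOk] at hdok
  simp only [pvAtZ] at hL
  rcases hdok with h' | h' | ⟨h1', h2' | h2'⟩ <;> simp_all <;> omega

theorem place_iff (board : List (List String)) (symbol : String)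
    (hpre : ∀ row ∈ board, board.length ≤ row.length)
    (p : Int × Int)
    (hp : 0 ≤ p.1 ∧ p.1 < (board.length : Int) ∧ 0 ≤ p.2 ∧ p.2 < (board.length : Int)) :
    (∃ q d, d ∈ pvDirs ∧ WinP (pvSet board p.1 p.2 symbol) symbol q d) ↔
      ((∃ q d, d ∈ pvDirs ∧ WinP board symbol q d ∧
          pvAtZ q d (-1) ≠ p ∧ pvAtZ q d (pvK board symbol d q : Int) ≠ p) ∨
       (∃ d ∈ pvDirs, LocalP board symbol p d)) := by
  have hlen : (pvSet board p.1 p.2 symbol).length = board.length := pvSet_length board p.1 p.2 symbol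
  have hSset : ∀ q, pvS (pvSet board p.1 p.2 symbol) symbol (board.length : Int) q =
      if q = p then true else pvS board symbol (board.length : Int) q := by
    intro q
    have := pvS_set board symbol p.1 p.2 hpre ⟨hp.1, hp.2.1, hp.2.2.1, hp.2.2.2⟩ q
    simpa using this
  have hOset : ∀ q, q ≠ p → pvOpen (pvSet board p.1 p.2 symbol) (board.length : Int) q =
      pvOpen board (board.length : Int) q := by
    intro q hq
    exact pvOpen_set board p.1 p.2 symbol hpre ⟨hp.1, hp.2.1, hp.2.2.1, hp.2.2.2⟩ q (by simpa using hq)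
  have hS'p : pvS (pvSet board p.1 p.2 symbol) symbol (board.length : Int) p = true := by
    rw [hSset]; simp
  constructor
  · rintro ⟨q, d, hd, hSq', hprev', hk5', hopen'⟩
    obtain ⟨hdok, hdneg⟩ := mem_dirs_ok d hd
    rw [hlen] at hSq' hprev' hopen'
    rw [pvAtZ_neg_one] at hprev' hopen'
    have hspec' := K_spec (pvSet board p.1 p.2 symbol) symbol d q hdok
    rw [hlen] at hspec'
    obtain ⟨hK1', hK2', hK3'⟩ := hspec'
    -- ℤ-indexed version of hK1'
    have hK1z : ∀ z : Int, 0 ≤ z → z < (pvK (pvSet board p.1 p.2 symbol) symbol d q : Int) →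
        pvS (pvSet board p.1 p.2 symbol) symbol (board.length : Int) (pvAtZ q d z) = true := by
      intro z h1 h2
      have := hK1' z.toNat (by omega)
      rwa [show ((z.toNat : Nat) : Int) = z by omega] at this
    have hprevne : (q.1 - d.1, q.2 - d.2) ≠ p := by
      intro h; rw [h, hS'p] at hprev'; simp at hprev'
    have hendne : pvAtZ q d (pvK (pvSet board p.1 p.2 symbol) symbol d q : Int) ≠ p := by
      intro h; rw [h, hS'p] at hK2'; simp at hK2'
    by_cases hon : ∃ j : Int, 0 ≤ j ∧ j < (pvK (pvSet board p.1 p.2 symbol) symbol d q : Int) ∧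
        pvAtZ q d j = p
    · -- the run passes through p: a local win
      obtain ⟨j, hj0, hjk, hjp⟩ := hon
      refine Or.inr ⟨d, hd, ?_⟩
      have hb : pvB board symbol p d = j.toNat := by
        apply run_eq (pvS board symbol (board.length : Int)) (-d.1, -d.2) (p.1 - d.1, p.2 - d.2)
          j.toNat (board.length + 1) (by omega)
        · intro i hi
          have hpos : pvAtZ (p.1 - d.1, p.2 - d.2) (-d.1, -d.2) (i : Int) = pvAtZ q d (j - 1 - i) := by
            rw [back_pos, ← hjp, pvAtZ_add]; congr 1; omega
          rw [hpos]
          have hne : pvAtZ q d (j - 1 - i) ≠ p := by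
            intro h; rw [← hjp] at h
            have := pvAtZ_inj d hdok q h; omega
          have := hK1z (j - 1 - i) (by omega) (by omega)
          rw [hSset, if_neg hne] at this
          exact this
        · have hpos : pvAtZ (p.1 - d.1, p.2 - d.2) (-d.1, -d.2) (j.toNat : Int) = (q.1 - d.1, q.2 - d.2) := by
            rw [back_pos, ← hjp, pvAtZ_add, ← pvAtZ_neg_one]; congr 1; omega
          rw [hpos]
          rw [hSset, if_neg hprevne] at hprev'
          exact hprev'
      have hf : pvF board symbol p d = pvK (pvSet board p.1 p.2 symbol) symbol d q - 1 - j.toNat := by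
        apply run_eq (pvS board symbol (board.length : Int)) d (p.1 + d.1, p.2 + d.2)
          (pvK (pvSet board p.1 p.2 symbol) symbol d q - 1 - j.toNat) (board.length + 1) (by omega)
        · intro i hi
          have hpos : pvAtZ (p.1 + d.1, p.2 + d.2) d (i : Int) = pvAtZ q d (j + 1 + i) := by
            rw [fwd_pos, ← hjp, pvAtZ_add]; congr 1; omega
          rw [hpos]
          have hne : pvAtZ q d (j + 1 + i) ≠ p := by
            intro h; rw [← hjp] at h
            have := pvAtZ_inj d hdok q h; omega
          have := hK1z (j + 1 + i) (by omega) (by omega)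
          rw [hSset, if_neg hne] at this
          exact this
        · have hpos : pvAtZ (p.1 + d.1, p.2 + d.2) d ((pvK (pvSet board p.1 p.2 symbol) symbol d q - 1 - j.toNat : Nat) : Int) =
              pvAtZ q d (pvK (pvSet board p.1 p.2 symbol) symbol d q : Int) := by
            have hidx : (1 : Int) + ((pvK (pvSet board p.1 p.2 symbol) symbol d q - 1 - j.toNat : Nat) : Int) =
                (pvK (pvSet board p.1 p.2 symbol) symbol d q : Int) - j := by omega
            rw [fwd_pos, hidx]
            conv_rhs => rw [show ((pvK (pvSet board p.1 p.2 symbol) symbol d q : Int)) =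
                j + ((pvK (pvSet board p.1 p.2 symbol) symbol d q : Int) - j) from by ring,
              ← pvAtZ_add, hjp]
          rw [hpos]
          rw [hSset, if_neg hendne] at hK2'
          exact hK2'
      have hbz : ((pvB board symbol p d : Int)) = j := by rw [hb]; omega
      have hfz : ((pvF board symbol p d : Int)) =
          (pvK (pvSet board p.1 p.2 symbol) symbol d q : Int) - 1 - j := by
        rw [hf]; omega
      constructor
      · omega
      · have hposL : (p.1 - d.1 * ((pvB board symbol p d : Int) + 1),
            p.2 - d.2 * ((pvB board symbol p d : Int) + 1)) = (q.1 - d.1, q.2 - d.2) := by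
          rw [hbz, ← hjp]
          simp only [pvAtZ, Prod.mk.injEq]
          constructor <;> ring
        have hposR : (p.1 + d.1 * ((pvF board symbol p d : Int) + 1),
            p.2 + d.2 * ((pvF board symbol p d : Int) + 1)) =
            pvAtZ q d (pvK (pvSet board p.1 p.2 symbol) symbol d q : Int) := by
          rw [hfz, ← hjp]
          simp only [pvAtZ, Prod.mk.injEq]
          constructor <;> ring
        rcases hopen' with h | h
        · exact Or.inl (by rw [hposL, ← hOset _ hprevne]; exact h)
        · exact Or.inr (by rw [hposR, ← hOset _ hendne]; exact h)
    · -- the run avoids p: an untouched win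
      simp only [not_exists, not_and] at hon
      have hne : ∀ z : Int, 0 ≤ z → z < (pvK (pvSet board p.1 p.2 symbol) symbol d q : Int) →
          pvAtZ q d z ≠ p := fun z h1 h2 => hon z h1 h2
      have hKeq : pvK board symbol d q = pvK (pvSet board p.1 p.2 symbol) symbol d q := by
        apply K_eq _ _ _ _ _ (by omega)
        · intro i hi
          have := hK1z i (by omega) (by omega)
          rw [hSset, if_neg (hne i (by omega) (by omega))] at this
          exact this
        · rw [hSset, if_neg hendne] at hK2'
          exact hK2'
      have hq0 : q ≠ p := by
        have := hne 0 le_rfl (by omega)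
        rwa [pvAtZ_zero] at this
      refine Or.inl ⟨q, d, hd, ⟨?_, ?_, ?_, ?_⟩, ?_, ?_⟩
      · rw [hSset, if_neg hq0] at hSq'; exact hSq'
      · rw [pvAtZ_neg_one]
        rw [hSset, if_neg hprevne] at hprev'
        exact hprev'
      · omega
      · rw [pvAtZ_neg_one, hKeq]
        rcases hopen' with h | h
        · exact Or.inl (by rw [← hOset _ hprevne]; exact h)
        · exact Or.inr (by rw [← hOset _ hendne]; exact h)
      · rw [pvAtZ_neg_one]; exact hprevne
      · rw [hKeq]; exact hendne
  · rintro (⟨q, d, hd, ⟨hSq, hprev, hk5, hopen⟩, he1, he2⟩ | ⟨d, hd, hloc⟩)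
    · -- untouched win stays a win after the placement
      obtain ⟨hdok, hdneg⟩ := mem_dirs_ok d hd
      have hspec := K_spec board symbol d q hdok
      obtain ⟨hK1, hK2, hK3⟩ := hspec
      have hKeq : pvK (pvSet board p.1 p.2 symbol) symbol d q = pvK board symbol d q := by
        have := K_eq (pvSet board p.1 p.2 symbol) symbol d q (pvK board symbol d q)
        rw [hlen] at this
        apply this (by omega)
        · intro i hi
          rw [hSset]
          split
          · rfl
          · exact hK1 i hi
        · rw [hSset, if_neg he2]
          exact hK2
      rw [pvAtZ_neg_one] at he1 hprev hopen
      refine ⟨q, d, hd, ?_, ?_, ?_, ?_⟩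
      · rw [hlen, hSset]
        split
        · rfl
        · exact hSq
      · rw [hlen, pvAtZ_neg_one, hSset, if_neg he1]
        exact hprev
      · omega
      · rw [hlen, pvAtZ_neg_one, hKeq]
        rcases hopen with h | h
        · exact Or.inl (by rw [hOset _ he1]; exact h)
        · exact Or.inr (by rw [hOset _ he2]; exact h)
    · -- a local win after placing at p
      obtain ⟨hdok, hdneg⟩ := mem_dirs_ok d hd
      obtain ⟨hcnt, hopen⟩ := hloc
      obtain ⟨ib, hib, hSib⟩ := stop_exists board symbol (-d.1, -d.2) (p.1 - d.1, p.2 - d.2) hdneg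
      have hbspec := run_spec (pvS board symbol (board.length : Int)) (-d.1, -d.2)
        (p.1 - d.1, p.2 - d.2) (board.length + 1) ⟨ib, by omega, hSib⟩
      obtain ⟨if_, hif, hSif⟩ := stop_exists board symbol d (p.1 + d.1, p.2 + d.2) hdok
      have hfspec := run_spec (pvS board symbol (board.length : Int)) d
        (p.1 + d.1, p.2 + d.2) (board.length + 1) ⟨if_, by omega, hSif⟩
      have hBdef : pvRun (pvS board symbol (board.length : Int)) (-d.1, -d.2)
          (p.1 - d.1, p.2 - d.2) (board.length + 1) = pvB board symbol p d := rfl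
      have hFdef : pvRun (pvS board symbol (board.length : Int)) d
          (p.1 + d.1, p.2 + d.2) (board.length + 1) = pvF board symbol p d := rfl
      rw [hBdef] at hbspec
      rw [hFdef] at hfspec
      have SBz : ∀ z : Int, -((pvB board symbol p d : Int)) ≤ z → z ≤ -1 →
          pvS board symbol (board.length : Int) (pvAtZ p d z) = true := by
        intro z h1 h2
        have := hbspec.1 (-1 - z).toNat (by omega)
        rwa [back_pos, show (-1 - (((-1 - z).toNat : Nat) : Int)) = z by omega] at this
      have SBstop : pvS board symbol (board.length : Int)
          (pvAtZ p d (-1 - (pvB board symbol p d : Int))) = false := by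
        have := hbspec.2.1
        rwa [back_pos] at this
      have SFz : ∀ z : Int, 1 ≤ z → z ≤ (pvF board symbol p d : Int) →
          pvS board symbol (board.length : Int) (pvAtZ p d z) = true := by
        intro z h1 h2
        have := hfspec.1 (z - 1).toNat (by omega)
        rwa [fwd_pos, show (1 + (((z - 1).toNat : Nat) : Int)) = z by omega] at this
      have SFstop : pvS board symbol (board.length : Int)
          (pvAtZ p d (1 + (pvF board symbol p d : Int))) = false := by
        have := hfspec.2.1
        rwa [fwd_pos] at this
      have hne0 : ∀ z : Int, z ≠ 0 → pvAtZ p d z ≠ p := by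
        intro z hz h
        exact hz (pvAtZ_inj d hdok p (h.trans (pvAtZ_zero p d).symm))
      have hS'run : ∀ z : Int, -((pvB board symbol p d : Int)) ≤ z → z ≤ (pvF board symbol p d : Int) →
          pvS (pvSet board p.1 p.2 symbol) symbol (board.length : Int) (pvAtZ p d z) = true := by
        intro z h1 h2
        rw [hSset]
        rcases lt_trichotomy z 0 with hz | hz | hz
        · rw [if_neg (hne0 z (by omega))]
          exact SBz z h1 (by omega)
        · subst hz
          rw [pvAtZ_zero, if_pos rfl]
        · rw [if_neg (hne0 z (by omega))]
          exact SFz z (by omega) h2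
      have hKs : pvK (pvSet board p.1 p.2 symbol) symbol d (pvAtZ p d (-(pvB board symbol p d : Int))) =
          pvB board symbol p d + 1 + pvF board symbol p d := by
        have hbound : pvB board symbol p d + 1 + pvF board symbol p d ≤ board.length := by
          have := chain_le (pvSet board p.1 p.2 symbol) symbol d hdok
            (pvAtZ p d (-(pvB board symbol p d : Int)))
            (pvB board symbol p d + 1 + pvF board symbol p d) ?_
          · rwa [hlen] at this
          · intro j hj
            rw [hlen, pvAtZ_add]
            exact hS'run _ (by omega) (by omega)
        have := K_eq (pvSet board p.1 p.2 symbol) symbol d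
          (pvAtZ p d (-(pvB board symbol p d : Int)))
          (pvB board symbol p d + 1 + pvF board symbol p d)
        rw [hlen] at this
        apply this (by omega)
        · intro i hi
          rw [pvAtZ_add]
          exact hS'run _ (by omega) (by omega)
        · rw [pvAtZ_add, hSset,
            if_neg (hne0 _ (by omega)),
            show (-(pvB board symbol p d : Int) + ((pvB board symbol p d + 1 + pvF board symbol p d : Nat) : Int)) =
              1 + (pvF board symbol p d : Int) by push_cast; ring]
          exact SFstop
      refine ⟨pvAtZ p d (-(pvB board symbol p d : Int)), d, hd, ?_, ?_, ?_, ?_⟩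
      · rw [hlen]
        exact hS'run _ le_rfl (by omega)
      · rw [hlen, pvAtZ_add, hSset, if_neg (hne0 _ (by omega))]
        rw [show (-(pvB board symbol p d : Int) + -1) = -1 - (pvB board symbol p d : Int) by ring]
        exact SBstop
      · rw [hKs]; omega
      · rw [hlen, hKs, pvAtZ_add, pvAtZ_add]
        have hL : pvAtZ p d (-(pvB board symbol p d : Int) + -1) =
            (p.1 - d.1 * ((pvB board symbol p d : Int) + 1), p.2 - d.2 * ((pvB board symbol p d : Int) + 1)) := by
          simp only [pvAtZ, Prod.mk.injEq]
          constructor <;> ring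
        have hR : pvAtZ p d (-(pvB board symbol p d : Int) + ((pvB board symbol p d + 1 + pvF board symbol p d : Nat) : Int)) =
            (p.1 + d.1 * ((pvF board symbol p d : Int) + 1), p.2 + d.2 * ((pvF board symbol p d : Int) + 1)) := by
          simp only [pvAtZ, Prod.mk.injEq]
          constructor <;> (push_cast; ring)
        rw [hL, hR]
        rcases hopen with h | h
        · refine Or.inl ?_
          rw [← h]
          apply hOset
          rw [← hL]
          exact hne0 _ (by omega)
        · refine Or.inr ?_
          rw [← h]
          apply hOset
          rw [← hR]
          exact hne0 _ (by push_cast; omega)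

theorem can_iff (board : List (List String)) (symbol : String) :
    can_win_next board symbol = true ↔
      ∃ p : Int × Int, (0 ≤ p.1 ∧ p.1 < (board.length : Int)) ∧
        (0 ≤ p.2 ∧ p.2 < (board.length : Int)) ∧ (pvCell board p.1 p.2 == "") = true ∧
        check_win (pvSet board p.1 p.2 symbol) symbol = true := by
  unfold can_win_next
  simp only [List.any_eq_true, PySem.List.mem_pyRange_one, ite_bool_then]
  constructor
  · rintro ⟨r, hr, c, hc, hcell, hcw⟩
    exact ⟨(r, c), hr, hc, hcell, hcw⟩
  · rintro ⟨⟨r, c⟩, hr, hc, hcell, hcw⟩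
    exact ⟨r, hr, c, hc, hcell, hcw⟩

-- ===== VERDICT (by name: the statement is the Claim_ definition above) =====
theorem can_win_next_spec : Claim_equal_can_win_next := by
  intro board symbol hdom hpre
  unfold Spec_can_win_next
  have hiff : can_win_next board symbol = true ↔ can_win_next_alt board symbol = true := by
    rw [can_iff, alt_iff]
    constructor
    · rintro ⟨p, hp1, hp2, hcell, hcw⟩
      exact ⟨p, hp1, hp2, hcell,
        (place_iff board symbol hpre p ⟨hp1.1, hp1.2, hp2.1, hp2.2⟩).1 ((check_win_iff _ _).1 hcw)⟩
    · rintro ⟨p, hp1, hp2, hcell, h⟩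
      exact ⟨p, hp1, hp2, hcell,
        (check_win_iff _ _).2 ((place_iff board symbol hpre p ⟨hp1.1, hp1.2, hp2.1, hp2.2⟩).2 h)⟩
  exact Bool.eq_iff_iff.mpr (by simpa using hiff)
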